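-- pv_equiv track=rewrite | github.com/KalifBell/joy_of_coding | Assignments/Week 3/Day 11 Lists & Strings/Writiing List 3.py | match
-- ===== SOURCE A (Python) =====
-- def match(x, y): # takes to strings as parameters this time x and y was chosen
--     common = 0 #sum aggregating "returns how many"
--     x = x.upper() # make all upper since the problem is not case senstive
--     y = y.upper()
--     seen = [] # Empty list to count
--
--     for letter in x:
--         if letter not in seen and y.count(letter) > 0: # for each letter in the string h e l l o
--             common += 1
--             seen.append(letter) # tell program to count common times we see the same letter in this case
--
--     return common # I should return 3 using test cases
-- ===== SOURCE B (Python) =====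
-- def match(x, y):
--     a = sorted(set(x.upper()))
--     b = sorted(set(y.upper()))
--     i = j = common = 0
--     while i < len(a) and j < len(b):
--         if a[i] == b[j]:
--             common += 1
--             i += 1
--             j += 1
--         elif a[i] < b[j]:
--             i += 1
--         else:
--             j += 1
--     return common
-- ===== Notes on version B (the rewrite author's own statement) =====
-- stated objective: faster
-- what changed: Replaces A's per-character seen-list membership test plus a full y.count scan for each character by sorting the deduplicated uppercased character sets of both strings and counting common characters with a two-pointer sorted merge.
import Mathlib
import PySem

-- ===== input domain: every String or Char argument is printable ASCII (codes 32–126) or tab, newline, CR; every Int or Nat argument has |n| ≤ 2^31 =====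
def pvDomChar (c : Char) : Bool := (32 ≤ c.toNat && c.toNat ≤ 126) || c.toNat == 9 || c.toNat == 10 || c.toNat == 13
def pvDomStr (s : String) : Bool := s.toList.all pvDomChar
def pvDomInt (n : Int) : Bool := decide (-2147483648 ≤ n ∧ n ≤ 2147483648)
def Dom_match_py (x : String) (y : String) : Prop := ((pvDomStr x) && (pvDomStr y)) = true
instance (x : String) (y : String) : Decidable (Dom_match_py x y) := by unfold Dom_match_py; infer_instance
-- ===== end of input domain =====

-- B replaces A's per-character seen-list membership test and y.count scan by sorting the deduplicated
-- uppercased character sets and counting common characters with a two-pointer sorted merge (alternative).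

-- ===== PORT A =====
-- literal port: common = 0; seen = []; for letter in x.upper(): if letter not in seen and y.upper().count(letter) > 0: common += 1; seen.append(letter)
def match_py (x : String) (y : String) : Int :=
  ((PySem.Chars.upper x.toList).foldl (fun (st : Int × List Char) letter =>
      if st.2.contains letter = false ∧ 0 < PySem.Chars.count (PySem.Chars.upper y.toList) [letter] then
        (st.1 + 1, st.2 ++ [letter])
      else st) ((0 : Int), ([] : List Char))).1

-- ===== PORT B =====
-- the two-pointer while loop of Source B as the obvious structural recursion on the two sorted lists
def pvMergeCount : List Char → List Char → Int
  | [], _ => 0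
  | _ :: _, [] => 0
  | a :: as, b :: bs =>
    if a = b then pvMergeCount as bs + 1
    else if a < b then pvMergeCount as (b :: bs)
    else pvMergeCount (a :: as) bs
termination_by a b => a.length + b.length

-- port of Source B: a = sorted(set(x.upper())); b = sorted(set(y.upper())); two-pointer merge count
def match_py_alt (x : String) (y : String) : Int :=
  pvMergeCount
    (PySem.List.sorted (PySem.Set.ofList (PySem.Chars.upper x.toList)) (fun c => c) false)
    (PySem.List.sorted (PySem.Set.ofList (PySem.Chars.upper y.toList)) (fun c => c) false)

-- ===== PRECONDITION & SPEC =====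
def Spec_match_py (x : String) (y : String) (out : Int) : Prop := out = match_py_alt x y
instance (x : String) (y : String) (out : Int) : Decidable (Spec_match_py x y out) := by unfold Spec_match_py; infer_instance

-- ===== CLAIM (what is proved, stated in full; the proofs are below) =====
def Claim_equal_match_py : Prop := ∀ (x : String) (y : String), Dom_match_py x y → Spec_match_py x y (match_py x y)

-- ===== LEMMAS AND PROOFS =====

-- Chars.count of a one-character needle is the character count
theorem pv_count_go_singleton (c : Char) (l : List Char) (acc : Nat) :
    PySem.Chars.count.go [c] l.length l acc = acc + l.count c := by
  induction l generalizing acc with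
  | nil => simp [PySem.Chars.count.go]
  | cons h t ih =>
      rw [List.length_cons, PySem.Chars.count.go]
      by_cases hch : c = h
      · subst hch
        simp [List.isPrefixOf, ih]
        omega
      · have : [c].isPrefixOf (h :: t) = false := by
          simp [List.isPrefixOf]
          intro hh
          exact hch (by simp [hh])
        simp [this, ih, List.count_cons]
        intro hh
        exact hch (by simp [hh])

theorem pv_count_singleton (c : Char) (l : List Char) :
    PySem.Chars.count l [c] = l.count c := by
  simp [PySem.Chars.count, pv_count_go_singleton]

-- the conditional-add step describing A's seen-list growth
def pvStep (yu : List Char) (s : List Char) (c : Char) : List Char :=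
  if yu.contains c then PySem.Set.add s c else s

theorem pv_loopA (yu l : List Char) (seen : List Char) :
    l.foldl (fun (st : Int × List Char) letter =>
        if st.2.contains letter = false ∧ 0 < PySem.Chars.count yu [letter] then
          (st.1 + 1, st.2 ++ [letter])
        else st) (((seen.length : Int)), seen)
      = (((l.foldl (pvStep yu) seen).length : Int), l.foldl (pvStep yu) seen) := by
  induction l generalizing seen with
  | nil => rfl
  | cons c t ih =>
      simp only [List.foldl_cons]
      by_cases hs : c ∈ seen
      · by_cases hy : c ∈ yu
        · have : pvStep yu seen c = seen := by
            simp [pvStep, hy, PySem.Set.add, hs]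
          rw [this]
          simpa [hs] using ih seen
        · have : pvStep yu seen c = seen := by simp [pvStep, hy]
          rw [this]
          simpa [hs, pv_count_singleton, List.count_eq_zero_of_not_mem hy] using ih seen
      · by_cases hy : c ∈ yu
        · have h1 : pvStep yu seen c = seen ++ [c] := by
            simp [pvStep, hy, PySem.Set.add, hs]
          have h2 : (0 : Nat) < PySem.Chars.count yu [c] := by
            simp [pv_count_singleton, List.count_pos_iff, hy]
          rw [h1]
          have := ih (seen ++ [c])
          simp only [List.length_append, List.length_cons, List.length_nil] at this
          simpa [hs, h2, Nat.cast_add] using this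
        · have : pvStep yu seen c = seen := by simp [pvStep, hy]
          rw [this]
          simpa [hs, pv_count_singleton, List.count_eq_zero_of_not_mem hy] using ih seen

theorem pv_filter_add (yu s : List Char) (c : Char) :
    (PySem.Set.add s c).filter (fun a => yu.contains a) = pvStep yu (s.filter (fun a => yu.contains a)) c := by
  by_cases hs : c ∈ s
  · have h1 : PySem.Set.add s c = s := by simp [PySem.Set.add, hs]
    rw [h1]
    by_cases hy : c ∈ yu
    · have : c ∈ s.filter (fun a => yu.contains a) := by
        simp [List.mem_filter, hs, hy]
      simp [pvStep, hy, PySem.Set.add, hs]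
    · simp [pvStep, hy]
  · have h1 : PySem.Set.add s c = s ++ [c] := by simp [PySem.Set.add, hs]
    rw [h1, List.filter_append]
    by_cases hy : c ∈ yu
    · have hnot : c ∉ s.filter (fun a => yu.contains a) := by
        simp [List.mem_filter, hs]
      simp [pvStep, hy, PySem.Set.add, hs]
    · simp [pvStep, hy]

theorem pv_filter_foldl (yu l s : List Char) :
    (l.foldl PySem.Set.add s).filter (fun a => yu.contains a)
      = l.foldl (pvStep yu) (s.filter (fun a => yu.contains a)) := by
  induction l generalizing s with
  | nil => rfl
  | cons c t ih =>
      simp only [List.foldl_cons]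
      rw [ih, pv_filter_add]

-- the merge count of two strictly increasing lists is the number of elements of the first present in the second
theorem pv_mergeCount_eq (a b : List Char)
    (ha : a.Pairwise (· < ·)) (hb : b.Pairwise (· < ·)) :
    pvMergeCount a b = ((a.filter (fun c => b.contains c)).length : Int) := by
  induction a generalizing b with
  | nil => simp [pvMergeCount]
  | cons p as ih =>
      induction b with
      | nil => simp [pvMergeCount]
      | cons q bs ihb =>
          have hpas : ∀ z ∈ as, p < z := (List.pairwise_cons.mp ha).1
          have has' : as.Pairwise (· < ·) := (List.pairwise_cons.mp ha).2
          have hqbs : ∀ z ∈ bs, q < z := (List.pairwise_cons.mp hb).1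
          have hbs' : bs.Pairwise (· < ·) := (List.pairwise_cons.mp hb).2
          by_cases heq : p = q
          · subst heq
            have hlist : (p :: as).filter (fun c => (p :: bs).contains c)
                = p :: as.filter (fun c => bs.contains c) := by
              rw [List.filter_cons_of_pos (by simp)]
              congr 1
              apply List.filter_congr
              intro z hz
              have hne : z ≠ p := fun h => absurd (hpas z hz) (by simp [h])
              simp [hne]
            rw [pvMergeCount, if_pos rfl, ih bs has' hbs', hlist]
            simp
          · by_cases hlt : p < q
            · have hnp : (q :: bs).contains p = false := by
                simp only [List.contains_eq_mem, List.mem_cons, decide_eq_false_iff_not]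
                rintro (h | h)
                · exact heq h
                · exact absurd (hqbs p h) (not_lt.mpr (le_of_lt hlt))
              have hlist : (p :: as).filter (fun c => (q :: bs).contains c)
                  = as.filter (fun c => (q :: bs).contains c) :=
                List.filter_cons_of_neg (by simpa using hnp)
              rw [pvMergeCount, if_neg heq, if_pos hlt, ih (q :: bs) has' hb, hlist]
            · have hgt : q < p := lt_of_le_of_ne (not_lt.mp hlt) (Ne.symm heq)
              have hfe : (p :: as).filter (fun c => (q :: bs).contains c)
                  = (p :: as).filter (fun c => bs.contains c) := by
                apply List.filter_congr
                intro z hz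
                have hz' : q < z := by
                  rcases List.mem_cons.mp hz with h | h
                  · exact h ▸ hgt
                  · exact lt_trans hgt (hpas z h)
                have hne : z ≠ q := fun h => absurd hz' (by simp [h])
                simp [hne]
              rw [pvMergeCount, if_neg heq, if_neg hlt, ihb hbs', hfe]

-- filtering by membership in a list is invariant (in length) under permutation of either side
theorem pv_alt_eq (x y : String) :
    match_py_alt x y
      = (((PySem.Set.ofList (PySem.Chars.upper x.toList)).filter
            (fun a => (PySem.Chars.upper y.toList).contains a)).length : Int) := by
  unfold match_py_alt
  set xu := PySem.Chars.upper x.toList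
  set yu := PySem.Chars.upper y.toList
  set sa := PySem.List.sorted (PySem.Set.ofList xu) (fun c => c) false with hsa
  set sb := PySem.List.sorted (PySem.Set.ofList yu) (fun c => c) false with hsb
  have ha : sa.Pairwise (· < ·) := PySem.List.sorted_ofList_pairwise_lt xu
  have hb : sb.Pairwise (· < ·) := PySem.List.sorted_ofList_pairwise_lt yu
  rw [pv_mergeCount_eq sa sb ha hb]
  -- replace membership in sb by membership in yu
  have hpred : sa.filter (fun c => sb.contains c) = sa.filter (fun c => yu.contains c) := by
    apply List.filter_congr
    intro z _
    by_cases h : z ∈ yu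
    · have : z ∈ sb := by
        rw [hsb, PySem.List.mem_sorted, PySem.Set.mem_ofList]
        exact h
      simp [this, h]
    · have : z ∉ sb := by
        rw [hsb, PySem.List.mem_sorted, PySem.Set.mem_ofList]
        exact h
      simp [this, h]
  rw [hpred]
  have hperm : (sa.filter (fun c => yu.contains c)).Perm
      ((PySem.Set.ofList xu).filter (fun c => yu.contains c)) :=
    (PySem.List.sorted_perm (PySem.Set.ofList xu) (fun c => c) false).filter _
  rw [hperm.length_eq]

-- ===== VERDICT (by name: the statement is the Claim_ definition above) =====
theorem match_py_spec : Claim_equal_match_py := by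
  intro x y _
  show match_py x y = match_py_alt x y
  unfold match_py
  rw [pv_alt_eq]
  have h1 := pv_loopA (PySem.Chars.upper y.toList) (PySem.Chars.upper x.toList) []
  simp only [List.length_nil, Nat.cast_zero] at h1
  rw [h1]
  have h2 := pv_filter_foldl (PySem.Chars.upper y.toList) (PySem.Chars.upper x.toList) []
  simp only [List.filter_nil] at h2
  rw [PySem.Set.ofList_eq_foldl] at *
  rw [← h2]
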